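-- pv_equiv track=rewrite | github.com/AlgoZenithNITC/GFG_POTD_Solutions_AlgoZenithNITC | 25-01-2024_Alternative_sorting.py | alternateSort
-- ===== SOURCE A (Python) =====
-- def alternateSort(arr):
--     arr.sort()
--     n = len(arr)
--
--     l, r = 0, n - 1
--     ans = []
--     flag = True
--
--     for i in range(n):
--         if flag:
--             ans.append(arr[r])
--             r -= 1
--         else:
--             ans.append(arr[l])
--             l += 1
--         flag = not flag
--
--     return ans
-- ===== SOURCE B (Python) =====
-- def _interleave(xs, ys):
--     ans = []
--     for a, b in zip(xs, ys):
--         ans.append(a)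
--         ans.append(b)
--     return ans + xs[len(ys):] + ys[len(xs):]
--
--
-- def alternateSort(arr):
--     arr.sort()
--     n = len(arr)
--     maxes = list(reversed(arr))[:(n + 1) // 2]
--     mins = arr[:n // 2]
--     return _interleave(maxes, mins)
-- ===== Notes on version B (the rewrite author's own statement) =====
-- stated objective: alternative
-- what changed: Replaces A's two-pointer index loop with flag toggling by precomputing the descending top half and ascending bottom half as two slices and interleaving them recursively.
import Mathlib
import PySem

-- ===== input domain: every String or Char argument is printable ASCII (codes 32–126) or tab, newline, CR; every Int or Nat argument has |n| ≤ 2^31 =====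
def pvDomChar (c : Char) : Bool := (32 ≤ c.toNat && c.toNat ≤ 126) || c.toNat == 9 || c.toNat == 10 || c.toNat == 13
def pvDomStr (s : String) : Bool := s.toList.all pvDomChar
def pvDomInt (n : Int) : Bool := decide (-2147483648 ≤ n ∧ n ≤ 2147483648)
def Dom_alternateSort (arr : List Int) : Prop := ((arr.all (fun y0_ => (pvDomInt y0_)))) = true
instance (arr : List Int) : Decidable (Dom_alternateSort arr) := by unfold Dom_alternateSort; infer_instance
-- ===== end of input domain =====

-- B replaces A's two-pointer index loop by interleaving two precomputed half-slices (alternative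
-- decomposition, same cost); both Pythons sort arr in place identically, the theorems are about the return value.

-- ===== PORT A =====
-- A's for-loop: structural recursion on the remaining iteration count, same state (l, r, flag, ans).
-- arr[r] / arr[l] ported with pyGet?; the indices are always in range on A's runs (l and r start at the
-- ends and meet after exactly n steps), so the `.getD 0` default is never used and A is total.
def loopA (s : List Int) : Nat → Int → Int → Bool → List Int → List Int
  | 0, _l, _r, _flag, ans => ans
  | k + 1, l, r, flag, ans =>
    if flag then
      loopA s k l (r - 1) (!flag) (ans ++ [(PySem.List.pyGet? s r).getD 0])
    else
      loopA s k (l + 1) r (!flag) (ans ++ [(PySem.List.pyGet? s l).getD 0])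

def alternateSort (arr : List Int) : List Int :=
  let s := PySem.List.sorted arr (fun x => x) false
  let n := s.length
  loopA s n 0 ((n : Int) - 1) true []

-- ===== PORT B =====
-- _interleave from Source B: the 'for a, b in zip(xs, ys)' loop with its two appends is a fold over
-- List.zip; the trailing slices xs[len(ys):] / ys[len(xs):] are drop (nonnegative start, exact).
def interleaveB (xs ys : List Int) : List Int :=
  ((xs.zip ys).foldl (fun ans p => ans ++ [p.1] ++ [p.2]) []) ++ xs.drop ys.length ++ ys.drop xs.length

-- list(reversed(arr)) is s.reverse; arr[:k] for the nonnegative ints k = (n+1)//2 resp. n//2 is take k (exact).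
def alternateSort_alt (arr : List Int) : List Int :=
  let s := PySem.List.sorted arr (fun x => x) false
  let n := s.length
  let maxes := s.reverse.take ((n + 1) / 2)
  let mins := s.take (n / 2)
  interleaveB maxes mins

-- ===== PRECONDITION & SPEC =====
def Spec_alternateSort (arr : List Int) (out : List Int) : Prop := out = alternateSort_alt arr
instance (arr : List Int) (out : List Int) : Decidable (Spec_alternateSort arr out) := by unfold Spec_alternateSort; infer_instance

-- ===== CLAIM (what is proved, stated in full; the proofs are below) =====
def Claim_equal_alternateSort : Prop := ∀ (arr : List Int), Dom_alternateSort arr → Spec_alternateSort arr (alternateSort arr)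

-- ===== LEMMAS AND PROOFS =====

-- Recursive characterisation of Source B's zip-interleave, convenient for the induction below.
def ilv : List Int → List Int → List Int
  | [], ys => ys
  | x :: xs, [] => x :: xs
  | x :: xs, y :: ys => x :: y :: ilv xs ys

lemma interleaveB_flat (xs ys : List Int) :
    interleaveB xs ys
      = (xs.zip ys).flatMap (fun p => [p.1, p.2]) ++ xs.drop ys.length ++ ys.drop xs.length := by
  have hfun : (fun (ans : List Int) (p : Int × Int) => ans ++ [p.1] ++ [p.2])
      = (fun ans p => ans ++ [p.1, p.2]) := by funext ans p; simp
  rw [interleaveB, hfun, PySem.List.foldl_append_eq_flatMap]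
  simp

lemma interleaveB_eq_ilv : ∀ (xs ys : List Int), interleaveB xs ys = ilv xs ys := by
  intro xs
  induction xs with
  | nil => intro ys; simp [interleaveB_flat, ilv]
  | cons x t IH =>
    intro ys
    cases ys with
    | nil => simp [interleaveB_flat, ilv]
    | cons y u =>
      rw [interleaveB_flat] at *
      have hIH := IH u
      rw [interleaveB_flat] at hIH
      simp only [ilv, List.zip_cons_cons, List.flatMap_cons, List.length_cons, List.drop_succ_cons,
        List.nil_append, List.cons_append, List.append_assoc] at *
      simp [← hIH]

-- The common characterisation of both programs: take the last element, then the first, alternating.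
def alt (m : List Int) : List Int :=
  if h : m = [] then []
  else
    m.getLast h ::
      (match hd : m.dropLast with
       | [] => []
       | x :: xs => x :: alt xs)
termination_by m.length
decreasing_by
  have hlen := congrArg List.length hd
  simp [List.length_dropLast] at hlen
  omega

lemma alt_nil : alt [] = [] := by simp [alt]

lemma alt_singleton (a : Int) : alt [a] = [a] := by simp [alt]

lemma alt_concat_cons (x y : Int) (m : List Int) :
    alt (x :: m ++ [y]) = y :: x :: alt m := by
  rw [alt]
  have h1 : (x :: m ++ [y]).getLast (by simp) = y := by
    simpa using List.getLast_concat (l := x :: m) (a := y)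
  have h2 : (x :: m ++ [y]).dropLast = x :: m := by
    simpa using List.dropLast_concat (l₁ := x :: m) (b := y)
  rw [dif_neg (by simp), h1]
  congr 1
  split
  · next heq => rw [h2] at heq; cases heq
  · next z zs heq => rw [h2] at heq; cases heq; rfl

-- Ends decomposition for the strong inductions.
lemma two_le_decomp (w : List Int) (h : 2 ≤ w.length) :
    ∃ x m y, w = x :: m ++ [y] := by
  cases w with
  | nil => simp at h
  | cons x t =>
    have ht : t ≠ [] := by intro hh; simp [hh] at h
    exact ⟨x, t.dropLast, t.getLast ht, by simp [List.dropLast_concat_getLast ht]⟩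

-- A's loop over the window w, sitting inside pre ++ w ++ suf, emits alt w.
lemma loopA_window : ∀ (n : Nat) (w : List Int), w.length = n →
    ∀ (pre suf acc : List Int),
      loopA (pre ++ w ++ suf) w.length (pre.length) ((pre.length : Int) + w.length - 1) true acc
        = acc ++ alt w := by
  intro n
  induction n using Nat.strong_induction_on with
  | _ n IH =>
    intro w hw pre suf acc
    match w, hw with
    | [], hw => simp [loopA, alt_nil]
    | [a], hw =>
      have hg : PySem.List.pyGet? (pre ++ [a] ++ suf) ((pre.length : Int) + (1:Nat) - 1) = some a := by
        have h0 : ((pre.length : Int) + (1:Nat) - 1) = (pre.length : Int) := by push_cast; ring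
        rw [h0]
        simpa using PySem.List.pyGet?_append_length (pre := pre) (y := a) (ys := suf)
      simp only [List.length_cons, List.length_nil, Nat.zero_add, loopA, if_pos, hg,
        Option.getD_some, alt_singleton]
    | x :: t₀ :: t₁, hw =>
      obtain ⟨x', m, y, hxm⟩ := two_le_decomp (x :: t₀ :: t₁) (by simp)
      rw [hxm]
      set s := pre ++ (x' :: m ++ [y]) ++ suf with hs
      have hlen : (x' :: m ++ [y]).length = m.length + 2 := by simp
      rw [hlen]
      have hr : (pre.length : Int) + ((m.length + 2 : Nat) : Int) - 1 = (((pre ++ x' :: m).length : Nat) : Int) := by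
        simp [List.length_append]; push_cast; ring
      have hg1 : PySem.List.pyGet? s ((pre.length : Int) + ((m.length + 2 : Nat) : Int) - 1) = some y := by
        rw [hr]
        have hss : s = (pre ++ x' :: m) ++ y :: suf := by simp [hs]
        rw [hss]
        exact PySem.List.pyGet?_append_length (pre := pre ++ x' :: m) (y := y) (ys := suf)
      have hg2 : PySem.List.pyGet? s (pre.length : Int) = some x' := by
        have hss : s = pre ++ x' :: (m ++ [y] ++ suf) := by simp [hs]
        rw [hss]
        exact PySem.List.pyGet?_append_length (pre := pre) (y := x') (ys := m ++ [y] ++ suf)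
      have hn : n = m.length + 2 := by rw [← hw, hxm]; simp
      have hIH := IH m.length (by omega) m rfl (pre ++ [x']) ([y] ++ suf)
        (acc ++ [y] ++ [x'])
      have hs' : (pre ++ [x']) ++ m ++ ([y] ++ suf) = s := by simp [hs]
      rw [hs'] at hIH
      show loopA s (m.length + 1 + 1) pre.length ((pre.length : Int) + ((m.length + 2 : Nat) : Int) - 1) true acc = acc ++ alt (x' :: m ++ [y])
      rw [loopA]
      rw [if_pos rfl, hg1]
      rw [loopA]
      simp only [Bool.not_true, if_neg (by decide : ¬ (false = true))]
      rw [hg2]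
      simp only [Option.getD_some]
      have harg1 : (pre.length : Int) + ((m.length + 2 : Nat) : Int) - 1 - 1
          = (((pre ++ [x']).length : Nat) : Int) + (m.length : Int) - 1 := by
        simp [List.length_append]; push_cast; ring
      have harg2 : (pre.length : Int) + 1 = (((pre ++ [x']).length : Nat) : Int) := by
        simp [List.length_append]
      rw [harg1, harg2]
      simp only [Bool.not_false]
      rw [hIH, alt_concat_cons]
      simp

-- B's two half-slices interleave to alt s.
lemma interleave_halves : ∀ (n : Nat) (s : List Int), s.length = n →
    ilv (s.reverse.take ((s.length + 1) / 2)) (s.take (s.length / 2)) = alt s := by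
  intro n
  induction n using Nat.strong_induction_on with
  | _ n IH =>
    intro s hsn
    match s, hsn with
    | [], _ => simp [ilv, alt_nil]
    | [a], _ => simp [ilv, alt_singleton]
    | x :: t₀ :: t₁, hsn =>
      obtain ⟨x', m, y, hxm⟩ := two_le_decomp (x :: t₀ :: t₁) (by simp)
      rw [hxm]
      have hn : n = m.length + 2 := by rw [← hsn, hxm]; simp
      have hlen : (x' :: m ++ [y]).length = m.length + 2 := by simp
      have hmax : ((x' :: m ++ [y]).reverse).take (((x' :: m ++ [y]).length + 1) / 2)
          = y :: m.reverse.take ((m.length + 1) / 2) := by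
        have hrev : (x' :: m ++ [y]).reverse = y :: (m.reverse ++ [x']) := by simp
        have hdiv : ((x' :: m ++ [y]).length + 1) / 2 = (m.length + 1) / 2 + 1 := by
          rw [hlen]; omega
        rw [hrev, hdiv, List.take_succ_cons,
          List.take_append_of_le_length (by simp; omega)]
      have hmin : (x' :: m ++ [y]).take ((x' :: m ++ [y]).length / 2)
          = x' :: m.take (m.length / 2) := by
        have hdiv : (x' :: m ++ [y]).length / 2 = m.length / 2 + 1 := by rw [hlen]; omega
        rw [hdiv]
        rw [show (x' :: m ++ [y]).take (m.length / 2 + 1) = x' :: (m ++ [y]).take (m.length / 2) from List.take_succ_cons]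
        rw [List.take_append_of_le_length (by omega)]
      rw [hmax, hmin, ilv, IH m.length (by omega) m rfl, alt_concat_cons]

lemma alternateSort_eq_alt (arr : List Int) :
    alternateSort arr = alt (PySem.List.sorted arr (fun x => x) false) := by
  unfold alternateSort
  have h := loopA_window (PySem.List.sorted arr (fun x => x) false).length
    (PySem.List.sorted arr (fun x => x) false) rfl [] [] []
  simpa using h

lemma alternateSort_alt_eq_alt (arr : List Int) :
    alternateSort_alt arr = alt (PySem.List.sorted arr (fun x => x) false) := by
  unfold alternateSort_alt
  rw [interleaveB_eq_ilv]
  exact interleave_halves (PySem.List.sorted arr (fun x => x) false).length _ rfl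

-- ===== VERDICT (by name: the statement is the Claim_ definition above) =====
theorem alternateSort_spec : Claim_equal_alternateSort := by
  intro arr _
  unfold Spec_alternateSort
  rw [alternateSort_eq_alt, alternateSort_alt_eq_alt]
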